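-- pv_equiv track=rewrite | github.com/synthesis-labs/AoC_2024 | vincent-de-comarmond/day_12/01.py | get_region_peri_area_cost
-- ===== SOURCE A (Python) =====
-- def get_region_peri_area_cost(region: set[tuple[int, int]]) -> dict[str, int]:
--     area = 0
--     peri = 0
--
--     for r, c in region:
--         area += 1
--         peri += 4
--
--         for rr, cc in [(r - 1, c), (r, c - 1), (r + 1, c), (r, c + 1)]:
--             if (rr, cc) in region:
--                 peri -= 1
--
--     cost = area * peri
--     return {"area": area, "peri": peri, "cost": cost}
-- ===== SOURCE B (Python) =====
-- def get_region_peri_area_cost(region: set[tuple[int, int]]) -> dict[str, int]: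
--     # Sort-then-scan: no membership tests. Each maximal horizontal run of cells
--     # contributes exactly 2 vertical boundary edges (its left and right side),
--     # and each maximal vertical run contributes 2 horizontal boundary edges,
--     # so peri = 2 * (#row-runs + #column-runs).
--     row_runs = 0
--     prev = None
--     for r, c in sorted(region):
--         if prev is None or prev[0] != r or prev[1] + 1 != c:
--             row_runs += 1
--         prev = (r, c)
--     col_runs = 0
--     prev = None
--     for c, r in sorted((c, r) for r, c in region):
--         if prev is None or prev[0] != c or prev[1] + 1 != r:
--             col_runs += 1
--         prev = (c, r)
--     area = len(region)
--     peri = 2 * (row_runs + col_runs)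
--     return {"area": area, "peri": peri, "cost": area * peri}
-- ===== Notes on version B (the rewrite author's own statement) =====
-- stated objective: alternative
-- what changed: B does not test neighbour membership at all: it sorts the cells row-major and column-major and counts maximal runs of consecutive cells in each direction, using the identity peri = 2*(row_runs + col_runs) (each maximal run contributes exactly its two end edges), with area = len(region); A instead scans all 4 neighbours of every cell against the set and subtracts 1 per present neighbour.
import Mathlib
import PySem

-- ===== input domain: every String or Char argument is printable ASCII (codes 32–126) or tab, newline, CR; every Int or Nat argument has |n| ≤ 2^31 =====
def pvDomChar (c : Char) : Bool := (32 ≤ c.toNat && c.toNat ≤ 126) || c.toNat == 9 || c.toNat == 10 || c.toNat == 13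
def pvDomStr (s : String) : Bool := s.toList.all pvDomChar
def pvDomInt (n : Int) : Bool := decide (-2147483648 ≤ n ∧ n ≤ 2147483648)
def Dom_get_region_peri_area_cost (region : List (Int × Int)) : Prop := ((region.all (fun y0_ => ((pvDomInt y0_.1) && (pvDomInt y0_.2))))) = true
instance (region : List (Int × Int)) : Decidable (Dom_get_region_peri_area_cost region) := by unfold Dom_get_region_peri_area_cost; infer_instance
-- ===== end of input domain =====

-- B is a different algorithm: instead of A's per-cell neighbour-membership scan, B sorts the
-- cells (row-major and column-major) and counts maximal runs of consecutive cells; each run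
-- contributes exactly 2 boundary edges in its direction, so peri = 2*(row_runs + col_runs)
-- ("alternative": no membership tests at all, sort-then-scan).

-- ===== PORT A =====
def get_region_peri_area_cost (region : List (Int × Int)) : List (String × Int) :=
  let st := region.foldl (fun (st : Int × Int) rc =>
      (st.1 + 1,
        [(rc.1 - 1, rc.2), (rc.1, rc.2 - 1), (rc.1 + 1, rc.2), (rc.1, rc.2 + 1)].foldl
          (fun pe nb => if nb ∈ region then pe - 1 else pe) (st.2 + 4))) (0, 0)
  [("area", st.1), ("peri", st.2), ("cost", st.1 * st.2)]

-- ===== PORT B =====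
/-- the body of both scan loops of Source B: `if prev is None or prev[0] != x[0] or prev[1] + 1 != x[1]: runs += 1; prev = x` -/
def pvStep (st : Int × Option (Int × Int)) (rc : Int × Int) : Int × Option (Int × Int) :=
  ((match st.2 with
    | none => st.1 + 1
    | some p => if p.1 ≠ rc.1 ∨ p.2 + 1 ≠ rc.2 then st.1 + 1 else st.1), some rc)

def get_region_peri_area_cost_alt (region : List (Int × Int)) : List (String × Int) :=
  -- row_runs: scan sorted(region) counting maximal runs of consecutive cells in a row
  let row_runs :=
    ((PySem.List.sorted2 region (fun q => q.1) (fun q => q.2)).foldl pvStep (0, none)).1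
  -- col_runs: scan sorted((c, r) for r, c in region) counting runs of consecutive cells in a column
  let col_runs :=
    ((PySem.List.sorted2 (region.map (fun q => (q.2, q.1))) (fun q => q.1) (fun q => q.2)).foldl
      pvStep (0, none)).1
  let area : Int := region.length
  let peri := 2 * (row_runs + col_runs)
  [("area", area), ("peri", peri), ("cost", area * peri)]

-- ===== PRECONDITION & SPEC =====
-- The Python argument is a set, rendered as a list of its DISTINCT elements; Pre_ states exactly
-- that set-shape (no duplicate pairs) — no input the Python A accepts is excluded.
def Pre_get_region_peri_area_cost (region : List (Int × Int)) : Prop := region.Nodup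
instance (region : List (Int × Int)) : Decidable (Pre_get_region_peri_area_cost region) := by unfold Pre_get_region_peri_area_cost; infer_instance
def pvWitness_get_region_peri_area_cost : (List (Int × Int)) := [(0, 0), (0, 1), (1, 1)]
def Spec_get_region_peri_area_cost (region : List (Int × Int)) (out : List (String × Int)) : Prop := out = get_region_peri_area_cost_alt region
instance (region : List (Int × Int)) (out : List (String × Int)) : Decidable (Spec_get_region_peri_area_cost region out) := by unfold Spec_get_region_peri_area_cost; infer_instance

-- ===== CLAIM (what is proved, stated in full; the proofs are below) =====
def Claim_equal_get_region_peri_area_cost : Prop := ∀ (region : List (Int × Int)), Dom_get_region_peri_area_cost region → Pre_get_region_peri_area_cost region → Spec_get_region_peri_area_cost region (get_region_peri_area_cost region)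

-- ===== LEMMAS AND PROOFS =====

/-- indicator of membership, as an Int -/
def pvInd (S : List (Int × Int)) (q : Int × Int) : Int := if q ∈ S then 1 else 0

/-- strict lexicographic order on cells (the order Python's tuple sort produces) -/
def pvLexLt (q p : Int × Int) : Prop := q.1 < p.1 ∨ (q.1 = p.1 ∧ q.2 < p.2)

/-- number of consecutive-successor adjacencies inside the list p :: l -/
def pvAdj : (Int × Int) → List (Int × Int) → Nat
  | _, [] => 0
  | p, x :: t => (if x = (p.1, p.2 + 1) then 1 else 0) + pvAdj x t

/-- A's fold, as length and a sum of per-cell contributions. -/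
lemma pvFoldA (S : List (Int × Int)) (L : List (Int × Int)) (a p : Int) :
    L.foldl (fun (st : Int × Int) rc =>
      (st.1 + 1,
        [(rc.1 - 1, rc.2), (rc.1, rc.2 - 1), (rc.1 + 1, rc.2), (rc.1, rc.2 + 1)].foldl
          (fun pe nb => if nb ∈ S then pe - 1 else pe) (st.2 + 4))) (a, p)
    = (a + L.length,
       p + (L.map (fun q => 4 - (pvInd S (q.1 - 1, q.2) + pvInd S (q.1, q.2 - 1)
              + pvInd S (q.1 + 1, q.2) + pvInd S (q.1, q.2 + 1)))).sum) := by
  induction L generalizing a p with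
  | nil => simp
  | cons x t ih =>
    have hstep : (a + 1,
        [(x.1 - 1, x.2), (x.1, x.2 - 1), (x.1 + 1, x.2), (x.1, x.2 + 1)].foldl
          (fun pe nb => if nb ∈ S then pe - 1 else pe) (p + 4))
        = (a + 1, p + (4 - (pvInd S (x.1 - 1, x.2) + pvInd S (x.1, x.2 - 1)
            + pvInd S (x.1 + 1, x.2) + pvInd S (x.1, x.2 + 1)))) := by
      simp only [List.foldl_cons, List.foldl_nil, pvInd, Prod.mk.injEq, true_and]
      split_ifs <;> ring
    rw [List.foldl_cons]
    rw [hstep, ih]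
    simp only [List.map_cons, List.sum_cons, List.length_cons, Prod.mk.injEq]
    refine ⟨by push_cast; ring, by ring⟩

/-- indicator sums are countP counts -/
lemma pvSumInd (S : List (Int × Int)) (L : List (Int × Int)) (f : (Int × Int) → (Int × Int)) :
    (L.map (fun q => pvInd S (f q))).sum = ((L.countP (fun q => decide (f q ∈ S))) : Int) := by
  induction L with
  | nil => simp
  | cons x t ih =>
    rw [List.map_cons, List.sum_cons, List.countP_cons, ih]
    by_cases h : f x ∈ S
    · simp [pvInd, h]; ring
    · simp [pvInd, h]

/-- shifting a filter by a bijection on cells preserves its count, on a duplicate-free list -/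
lemma pvFilterShift (S : List (Int × Int)) (hS : S.Nodup)
    (f g : (Int × Int) → (Int × Int)) (hfg : ∀ q, g (f q) = q) (hgf : ∀ q, f (g q) = q) :
    S.countP (fun q => decide (f q ∈ S)) = S.countP (fun q => decide (g q ∈ S)) := by
  have h1 : ∀ (p : (Int × Int) → Bool), S.countP p = (S.toFinset.filter (fun q => p q = true)).card := by
    intro p
    rw [List.countP_eq_length_filter, ← List.toFinset_filter]
    exact (List.toFinset_card_of_nodup (hS.filter p)).symm
  rw [h1, h1]
  apply Finset.card_bij (fun q _ => f q)
  · intro q hq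
    simp only [Finset.mem_filter, List.mem_toFinset, decide_eq_true_eq] at *
    exact ⟨hq.2, by rw [hfg]; exact hq.1⟩
  · intro q1 h1 q2 h2 h
    have := congrArg g h
    rwa [hfg, hfg] at this
  · intro q hq
    simp only [Finset.mem_filter, List.mem_toFinset, decide_eq_true_eq] at *
    exact ⟨g q, ⟨hq.2, by rw [hgf]; exact hq.1⟩, hgf q⟩

/-- sums of pointwise sums split -/
lemma pvSumSplit (L : List (Int × Int)) (f g : (Int × Int) → Int) :
    (L.map (fun q => f q + g q)).sum = (L.map f).sum + (L.map g).sum := by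
  induction L with
  | nil => simp
  | cons x t ih => simp only [List.map_cons, List.sum_cons, ih]; ring

lemma pvSumConstSub (L : List (Int × Int)) (f : (Int × Int) → Int) :
    (L.map (fun q => 4 - f q)).sum = 4 * (L.length : Int) - (L.map f).sum := by
  induction L with
  | nil => simp
  | cons x t ih => simp only [List.map_cons, List.sum_cons, List.length_cons, ih]; push_cast; ring

/-- Python's tuple sort is the sort by the lexicographic key. -/
lemma pvSorted2Eq (xs : List (Int × Int)) :
    PySem.List.sorted2 xs (fun q => q.1) (fun q => q.2)
      = PySem.List.sorted xs (fun q => toLex (q.1, q.2)) := by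
  have hbef : (fun (a b : Int × Int) =>
        decide (a.1 < b.1) || (!decide (b.1 < a.1) && decide (a.2 < b.2)))
      = (fun (a b : Int × Int) => decide (toLex (a.1, a.2) < toLex (b.1, b.2))) := by
    funext a b
    have h : (toLex (a.1, a.2) < toLex (b.1, b.2)) ↔ (a.1 < b.1 ∨ (a.1 = b.1 ∧ a.2 < b.2)) :=
      Prod.Lex.lt_iff
    by_cases h1 : a.1 < b.1 <;> by_cases h2 : b.1 < a.1 <;> by_cases h3 : a.2 < b.2 <;>
      simp [h1, h2, h3, h] <;> omega
  show xs.foldl (fun acc x => PySem.List.insertBy _ x acc) [] = xs.foldl (fun acc x => PySem.List.insertBy _ x acc) []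
  rw [show (if (false : Bool) = true then (fun a b : Int × Int =>
      decide (toLex (b.1, b.2) < toLex (a.1, a.2))) else fun a b : Int × Int =>
      decide (toLex (a.1, a.2) < toLex (b.1, b.2))) = _ from rfl]
  simp only [if_neg (by decide : ¬ (false : Bool) = true)]
  rw [hbef]

/-- the sorted list is strictly lexicographically increasing when the input has no duplicates -/
lemma pvSortedStrict (xs : List (Int × Int)) (hnd : xs.Nodup) :
    (PySem.List.sorted2 xs (fun q => q.1) (fun q => q.2)).Pairwise pvLexLt := by
  rw [pvSorted2Eq]
  have hle := PySem.List.sorted_pairwise xs (fun q => toLex (q.1, q.2))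
  have hperm := PySem.List.sorted_perm xs (fun q => toLex (q.1, q.2)) false
  have hnd' : (PySem.List.sorted xs (fun q => toLex (q.1, q.2))).Nodup :=
    (hperm.nodup_iff).mpr hnd
  have := (hle.and hnd')
  refine this.imp ?_
  rintro a b ⟨hle2, hne⟩
  have hlt : toLex (a.1, a.2) < toLex (b.1, b.2) := by
    rcases lt_or_eq_of_le hle2 with h | h
    · exact h
    · exfalso; apply hne
      have : ((a.1, a.2) : Int × Int) = (b.1, b.2) := by
        have := congrArg ofLex h; simpa using this
      obtain ⟨h1, h2⟩ := Prod.mk.injEq .. ▸ this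
      exact Prod.ext h1 h2
  have := Prod.Lex.lt_iff.mp hlt
  simpa [pvLexLt] using this

/-- nothing lies strictly between a cell and its successor -/
lemma pvGapFree (x y : Int × Int) (h1 : pvLexLt x y) (h2 : pvLexLt y (x.1, x.2 + 1)) : False := by
  unfold pvLexLt at h1 h2; simp at h1 h2; omega

lemma pvLexSuccSelf (x : Int × Int) : ¬ ((x.1, x.2 + 1) = x) := by
  intro h; have := congrArg Prod.snd h; simp at this

/-- the scan fold after the first element -/
lemma pvFoldStep (l : List (Int × Int)) (n : Int) (p : Int × Int) :
    (l.foldl pvStep (n, some p)).1 = n + l.length - pvAdj p l := by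
  induction l generalizing n p with
  | nil => simp [pvAdj]
  | cons x t ih =>
    rw [List.foldl_cons]
    have hstep : pvStep (n, some p) x
        = ((if p.1 ≠ x.1 ∨ p.2 + 1 ≠ x.2 then n + 1 else n), some x) := rfl
    rw [hstep]
    by_cases h : x = (p.1, p.2 + 1)
    · have hc : ¬ (p.1 ≠ x.1 ∨ p.2 + 1 ≠ x.2) := by
        rw [h]; simp
      rw [if_neg hc, ih]
      have : pvAdj p (x :: t) = 1 + pvAdj x t := by simp [pvAdj, h]
      rw [this]
      push_cast; simp; ring
    · have hc : (p.1 ≠ x.1 ∨ p.2 + 1 ≠ x.2) := by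
        by_contra hcon
        simp only [not_or, not_not, ne_eq, Decidable.not_not] at hcon
        exact h (Prod.ext hcon.1.symm hcon.2.symm)
      rw [if_pos hc, ih]
      have : pvAdj p (x :: t) = pvAdj x t := by simp [pvAdj, h]
      rw [this]
      push_cast; simp; ring

/-- on a strictly increasing list, the adjacency count is the successor-membership count -/
lemma pvAdjCount (x : Int × Int) (t : List (Int × Int))
    (h : (x :: t).Pairwise pvLexLt) :
    pvAdj x t = (x :: t).countP (fun z => decide ((z.1, z.2 + 1) ∈ x :: t)) := by
  induction t generalizing x with
  | nil =>
    simp only [pvAdj, List.countP_cons, List.countP_nil]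
    have : ¬ ((x.1, x.2 + 1) ∈ [x]) := by
      simp only [List.mem_singleton]; exact pvLexSuccSelf x
    simp [this]
  | cons y t' ih =>
    have hxy : pvLexLt x y := (List.pairwise_cons.mp h).1 y (List.mem_cons_self ..)
    have hxall : ∀ z ∈ y :: t', pvLexLt x z := (List.pairwise_cons.mp h).1
    have htail : (y :: t').Pairwise pvLexLt := (List.pairwise_cons.mp h).2
    have hyall : ∀ z ∈ t', pvLexLt y z := (List.pairwise_cons.mp htail).1
    -- succ x ∈ whole list ↔ y = succ x
    have hmemx : ((x.1, x.2 + 1) ∈ x :: y :: t') ↔ (y = (x.1, x.2 + 1)) := by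
      constructor
      · intro hm
        rcases List.mem_cons.mp hm with h1 | h1
        · exact absurd h1 (pvLexSuccSelf x)
        · rcases List.mem_cons.mp h1 with h2 | h2
          · exact h2.symm
          · exact (pvGapFree x y hxy (hyall _ h2)).elim
      · intro hy; exact List.mem_cons.mpr (Or.inr (List.mem_cons.mpr (Or.inl hy.symm)))
    -- for tail elements, membership of the successor in the whole list = in the tail
    have hcongr : ∀ z ∈ y :: t',
        (decide ((z.1, z.2 + 1) ∈ x :: y :: t') = true)
          ↔ (decide ((z.1, z.2 + 1) ∈ y :: t') = true) := by
      intro z hz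
      simp only [decide_eq_true_eq, List.mem_cons]
      constructor
      · rintro (h1 | h1)
        · exfalso
          have hxz : pvLexLt x z := hxall z hz
          have hzs : pvLexLt z (z.1, z.2 + 1) := by unfold pvLexLt; simp
          rw [h1] at hzs
          unfold pvLexLt at hxz hzs; omega
        · exact h1
      · intro h1; exact Or.inr h1
    rw [show pvAdj x (y :: t') = (if y = (x.1, x.2 + 1) then 1 else 0) + pvAdj y t' from rfl]
    rw [show List.countP (fun z => decide ((z.1, z.2 + 1) ∈ x :: y :: t')) (x :: y :: t')
        = List.countP (fun z => decide ((z.1, z.2 + 1) ∈ x :: y :: t')) (y :: t')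
          + if decide ((x.1, x.2 + 1) ∈ x :: y :: t') = true then 1 else 0 from List.countP_cons]
    rw [List.countP_congr (q := fun z => decide ((z.1, z.2 + 1) ∈ y :: t')) hcongr, ← ih y htail]
    by_cases hy : y = (x.1, x.2 + 1)
    · have hm : ((x.1, x.2 + 1) ∈ x :: y :: t') := hmemx.mpr hy
      simp [hy, hm]; omega
    · have hm : ¬ ((x.1, x.2 + 1) ∈ x :: y :: t') := fun hmm => hy (hmemx.mp hmm)
      simp only [if_neg (by simpa using hm : ¬ decide ((x.1, x.2 + 1) ∈ x :: y :: t') = true),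
        if_neg hy]
      omega

/-- the run-count of any strictly sorted rearrangement of S, as a closed form over S -/
lemma pvRuns (S L : List (Int × Int)) (hperm : L.Perm S) (hpair : L.Pairwise pvLexLt) :
    (L.foldl pvStep ((0 : Int), (none : Option (Int × Int)))).1
      = (S.length : Int) - S.countP (fun z => decide ((z.1, z.2 + 1) ∈ S)) := by
  cases L with
  | nil =>
    have hS : [] = S := hperm.nil_eq
    rw [← hS]; simp
  | cons x t =>
    rw [List.foldl_cons, show pvStep (0, none) x = (1, some x) from rfl, pvFoldStep]
    have hcnt : (x :: t).countP (fun z => decide ((z.1, z.2 + 1) ∈ x :: t))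
        = S.countP (fun z => decide ((z.1, z.2 + 1) ∈ S)) := by
      rw [List.countP_congr (q := fun z => decide ((z.1, z.2 + 1) ∈ S))
        (fun z _ => by simp [hperm.mem_iff])]
      exact hperm.countP_eq _
    have hlen : S.length = t.length + 1 := by rw [← hperm.length_eq]; simp
    have hadj := pvAdjCount x t hpair
    rw [hadj, hcnt] at *
    have hle : S.countP (fun z => decide ((z.1, z.2 + 1) ∈ S)) ≤ S.length :=
      List.countP_le_length
    push_cast [hlen]
    omega

/-- membership of the swapped successor in the swapped list -/
lemma pvSwapMem (region : List (Int × Int)) (q : Int × Int) :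
    ((q.2, q.1 + 1) ∈ region.map (fun r => (r.2, r.1))) ↔ ((q.1 + 1, q.2) ∈ region) := by
  simp only [List.mem_map]
  constructor
  · rintro ⟨w, hw, heq⟩
    have h1 := congrArg Prod.fst heq
    have h2 := congrArg Prod.snd heq
    simp at h1 h2
    have : w = (q.1 + 1, q.2) := Prod.ext h2 h1
    rwa [this] at hw
  · intro h; exact ⟨(q.1 + 1, q.2), h, rfl⟩

-- ===== VERDICT (by name: the statement is the Claim_ definition above) =====
theorem get_region_peri_area_cost_spec : Claim_equal_get_region_peri_area_cost := by
  intro region _ hpre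
  unfold Spec_get_region_peri_area_cost get_region_peri_area_cost get_region_peri_area_cost_alt
  simp only [pvFoldA region region 0 0]
  -- the two B-side run counts
  have hrow : ((PySem.List.sorted2 region (fun q => q.1) (fun q => q.2)).foldl pvStep (0, none)).1
      = (region.length : Int) - region.countP (fun z => decide ((z.1, z.2 + 1) ∈ region)) :=
    pvRuns region _ (PySem.List.sorted2_perm region _ _ false) (pvSortedStrict region hpre)
  have hndM : (region.map (fun r => (r.2, r.1))).Nodup :=
    hpre.map (fun a b hab => by
      have h1 := congrArg Prod.fst hab; have h2 := congrArg Prod.snd hab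
      simp at h1 h2; exact Prod.ext h2 h1)
  have hcol : ((PySem.List.sorted2 (region.map (fun q => (q.2, q.1))) (fun q => q.1) (fun q => q.2)).foldl pvStep (0, none)).1
      = (region.length : Int) - region.countP (fun z => decide ((z.1 + 1, z.2) ∈ region)) := by
    rw [pvRuns (region.map (fun r => (r.2, r.1))) _
      (PySem.List.sorted2_perm _ _ _ false) (pvSortedStrict _ hndM)]
    rw [List.countP_map]
    rw [List.countP_congr (q := fun z => decide ((z.1 + 1, z.2) ∈ region)) (fun z _ => by
      simp only [Function.comp_apply, decide_eq_true_eq]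
      exact pvSwapMem region z)]
    simp
  -- A's perimeter as the same closed form
  have hperi :
      (0 : Int) + (region.map (fun q => 4 - (pvInd region (q.1 - 1, q.2) + pvInd region (q.1, q.2 - 1)
              + pvInd region (q.1 + 1, q.2) + pvInd region (q.1, q.2 + 1)))).sum
      = 2 * (((region.length : Int) - region.countP (fun z => decide ((z.1, z.2 + 1) ∈ region)))
           + ((region.length : Int) - region.countP (fun z => decide ((z.1 + 1, z.2) ∈ region)))) := by
    rw [pvSumConstSub]
    have hsplit : (region.map (fun q => pvInd region (q.1 - 1, q.2) + pvInd region (q.1, q.2 - 1)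
              + pvInd region (q.1 + 1, q.2) + pvInd region (q.1, q.2 + 1))).sum
        = (region.map (fun q => pvInd region (q.1 - 1, q.2))).sum
          + (region.map (fun q => pvInd region (q.1, q.2 - 1))).sum
          + (region.map (fun q => pvInd region (q.1 + 1, q.2))).sum
          + (region.map (fun q => pvInd region (q.1, q.2 + 1))).sum := by
      rw [← pvSumSplit region (fun q => pvInd region (q.1 - 1, q.2)) (fun q => pvInd region (q.1, q.2 - 1))]
      rw [← pvSumSplit region _ (fun q => pvInd region (q.1 + 1, q.2))]
      rw [← pvSumSplit region _ (fun q => pvInd region (q.1, q.2 + 1))]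
    have hshr : (region.map (fun q => pvInd region (q.1 - 1, q.2))).sum
        = (region.map (fun q => pvInd region (q.1 + 1, q.2))).sum := by
      rw [pvSumInd region region (fun q => (q.1 - 1, q.2)), pvSumInd region region (fun q => (q.1 + 1, q.2))]
      exact congrArg Nat.cast (pvFilterShift region hpre (fun q => (q.1 - 1, q.2)) (fun q => (q.1 + 1, q.2))
        (fun q => by obtain ⟨a, b⟩ := q; simp) (fun q => by obtain ⟨a, b⟩ := q; simp))
    have hshc : (region.map (fun q => pvInd region (q.1, q.2 - 1))).sum
        = (region.map (fun q => pvInd region (q.1, q.2 + 1))).sum := by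
      rw [pvSumInd region region (fun q => (q.1, q.2 - 1)), pvSumInd region region (fun q => (q.1, q.2 + 1))]
      exact congrArg Nat.cast (pvFilterShift region hpre (fun q => (q.1, q.2 - 1)) (fun q => (q.1, q.2 + 1))
        (fun q => by obtain ⟨a, b⟩ := q; simp) (fun q => by obtain ⟨a, b⟩ := q; simp))
    rw [hsplit, hshr, hshc,
      pvSumInd region region (fun q => (q.1 + 1, q.2)), pvSumInd region region (fun q => (q.1, q.2 + 1))]
    ring
  rw [hrow, hcol]
  simp only [zero_add] at hperi ⊢
  rw [hperi]
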